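-- pv_equiv track=rewrite | github.com/fedyaanci/stepik_py | matrix/horse.py | to_form
-- ===== SOURCE A (Python) =====
-- def to_form(input):
--     letters='abcdefgh'
--     x = ''
--     for i in range(len(letters)):
--         if letters[i]==input[0]:
--             x=i
--     if x == '':
--         exit()
--     return str(x)+str(input[1])
-- ===== SOURCE B (Python) =====
-- def to_form(input):
--     letters = 'abcdefgh'
--     c = input[0]
--     if c not in letters:
--         exit()
--     x = ord(c) - ord('a')
--     return str(x) + str(input[1])
-- ===== Notes on version B (the rewrite author's own statement) =====
-- stated objective: idiomatic
-- what changed: Replaced the 8-step scanning loop that records the last matching index with a membership test plus a closed-form index computed by character-code subtraction.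
import Mathlib
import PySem

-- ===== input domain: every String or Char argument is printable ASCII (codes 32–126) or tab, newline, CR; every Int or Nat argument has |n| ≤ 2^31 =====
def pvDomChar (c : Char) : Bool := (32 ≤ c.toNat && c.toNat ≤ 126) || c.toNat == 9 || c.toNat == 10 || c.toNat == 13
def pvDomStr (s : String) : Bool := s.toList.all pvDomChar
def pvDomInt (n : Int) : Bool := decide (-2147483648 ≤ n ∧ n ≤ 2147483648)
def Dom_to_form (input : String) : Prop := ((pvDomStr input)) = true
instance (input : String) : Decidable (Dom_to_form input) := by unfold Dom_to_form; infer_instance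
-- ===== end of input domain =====

-- B replaces A's scan for the last matching letter with a membership test plus the
-- closed-form character-code subtraction; return value only (idiomatic, not faster).

-- ===== PORT A =====
-- x starts as '' and may become an int: modelled as Option Int (none = '').
-- exit() and an out-of-range input[1] are excluded by Pre_; the port returns "" there.
def to_form (input : String) : String :=
  let letters : String := "abcdefgh"
  let x : Option Int :=
    (PySem.List.pyRange 0 8 1).foldl
      (fun x i =>
        if PySem.Str.pyGet? letters i = PySem.Str.pyGet? input 0 then some i else x)
      none
  match x with
  | none => ""            -- exit()
  | some x =>
    match PySem.Str.pyGet? input 1 with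
    | none => ""          -- IndexError, excluded by Pre_
    | some c => PySem.Int.toStr x ++ String.ofList [c]

-- ===== PORT B =====
def to_form_alt (input : String) : String :=
  match PySem.Str.pyGet? input 0 with
  | none => ""            -- IndexError, excluded by Pre_
  | some c =>
    if ("abcdefgh".toList).contains c then
      let x : Int := (c.toNat : Int) - 97
      match PySem.Str.pyGet? input 1 with
      | none => ""        -- IndexError, excluded by Pre_
      | some d => PySem.Int.toStr x ++ String.ofList [d]
    else ""               -- exit()

-- ===== PRECONDITION & SPEC =====
-- Pre_ = exactly the inputs where A returns: at least two characters and a first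
-- character among the eight board letters (otherwise A raises IndexError or calls exit()).
def Pre_to_form (input : String) : Prop :=
  2 ≤ input.toList.length ∧ input.toList.headD ' ' ∈ "abcdefgh".toList
instance (input : String) : Decidable (Pre_to_form input) := by unfold Pre_to_form; infer_instance
def pvWitness_to_form : String := "e2"

def Spec_to_form (input : String) (out : String) : Prop := out = to_form_alt input
instance (input : String) (out : String) : Decidable (Spec_to_form input out) := by unfold Spec_to_form; infer_instance

-- ===== CLAIM (what is proved, stated in full; the proofs are below) =====
def Claim_equal_to_form : Prop := ∀ (input : String), Dom_to_form input → Pre_to_form input → Spec_to_form input (to_form input)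

-- ===== LEMMAS AND PROOFS =====

-- ===== VERDICT (by name: the statement is the Claim_ definition above) =====
theorem to_form_spec : Claim_equal_to_form := by
  intro input _ hpre
  obtain ⟨hlen, hmem⟩ := hpre
  unfold Spec_to_form to_form to_form_alt
  match hL : input.toList with
  | [] => simp [hL] at hlen
  | [c] => simp [hL] at hlen
  | c :: d :: rest =>
    rw [hL] at hmem
    simp only [List.headD_cons] at hmem
    have h0 : PySem.Str.pyGet? input 0 = some c := by
      simp [pysem, hL]
    have h1 : PySem.Str.pyGet? input 1 = some d := by
      simp [pysem, hL]
    rw [h0, h1]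
    have hlist : "abcdefgh".toList = ['a','b','c','d','e','f','g','h'] := by decide
    rw [hlist] at hmem
    simp only [List.mem_cons, List.not_mem_nil, or_false] at hmem
    rcases hmem with h|h|h|h|h|h|h|h <;> subst h <;>
      simp [PySem.Str.pyGet?, PySem.Chars.pyGet?, PySem.List.pyGet?, PySem.List.pyIdx?,
            PySem.List.pyRange, PySem.Int.toStr, PySem.Int.toChars, List.range_succ]
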